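-- pv_equiv track=rewrite | github.com/AryBacher/tpIntroProgramacion | tpintro.py | colocar_minas
-- ===== SOURCE A (Python) =====
-- def colocar_minas(filas:int, columnas: int, minas:int) -> list[list[int]]:
--     matriz: list = []
--     cantidad_minas: int = 0
--     for i in range(filas):
--         fila = []
--         for j in range(columnas):
--             if cantidad_minas < minas:
--                 fila.append(-1)
--                 cantidad_minas += 1
--             else:
--                 fila.append(0)
--         matriz.append(fila)
--
--     return matriz
-- ===== SOURCE B (Python) =====
-- def colocar_minas(filas: int, columnas: int, minas: int) -> list[list[int]]:
--     total = max(filas, 0) * max(columnas, 0)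
--     flat = [-1 if k < minas else 0 for k in range(total)]
--     return [flat[i * columnas:(i + 1) * columnas] for i in range(filas)]
-- ===== Notes on version B (the rewrite author's own statement) =====
-- stated objective: alternative
-- what changed: Replaces the nested loops with a running mine counter by a single flat fill (cell k is a mine iff k < minas) reshaped into rows with list slices.
import Mathlib
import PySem

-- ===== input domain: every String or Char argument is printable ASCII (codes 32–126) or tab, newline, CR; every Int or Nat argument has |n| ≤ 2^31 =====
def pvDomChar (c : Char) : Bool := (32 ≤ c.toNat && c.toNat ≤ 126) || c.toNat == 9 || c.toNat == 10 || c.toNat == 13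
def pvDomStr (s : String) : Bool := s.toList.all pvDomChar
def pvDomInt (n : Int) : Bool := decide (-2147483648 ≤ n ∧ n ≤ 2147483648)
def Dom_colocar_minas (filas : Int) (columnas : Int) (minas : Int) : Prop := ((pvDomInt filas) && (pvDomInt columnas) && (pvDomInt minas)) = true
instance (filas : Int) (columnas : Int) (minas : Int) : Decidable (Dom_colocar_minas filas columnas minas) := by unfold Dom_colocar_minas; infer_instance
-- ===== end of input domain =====

-- B builds the board as one flat fill (cell k is a mine iff k < minas) reshaped into rows by slicing,
-- instead of A's nested loops with a running mine counter; same output, an alternative decomposition.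

-- ===== PORT A =====
-- inner-loop body: append -1 and bump the counter while it is below minas, else append 0
def pvStepCell (m : Int) (p : List Int × Int) (_j : Int) : List Int × Int :=
  if p.2 < m then (p.1 ++ [-1], p.2 + 1) else (p.1 ++ [0], p.2)

-- outer-loop body: build one fila with the inner loop, append it, keep the counter
def pvStepRow (c m : Int) (st : List (List Int) × Int) (_i : Int) : List (List Int) × Int :=
  let inner := (PySem.List.pyRange 0 c 1).foldl (pvStepCell m) ([], st.2)
  (st.1 ++ [inner.1], inner.2)

def colocar_minas (filas : Int) (columnas : Int) (minas : Int) : List (List Int) :=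
  ((PySem.List.pyRange 0 filas 1).foldl (pvStepRow columnas minas) ([], 0)).1

-- ===== PORT B =====
def colocar_minas_alt (filas : Int) (columnas : Int) (minas : Int) : List (List Int) :=
  let total := max filas 0 * max columnas 0
  let flat := (PySem.List.pyRange 0 total 1).map (fun k => if k < minas then (-1 : Int) else 0)
  (PySem.List.pyRange 0 filas 1).map (fun i =>
    PySem.List.slice flat (some (i * columnas)) (some ((i + 1) * columnas)))

-- ===== PRECONDITION & SPEC =====
def Spec_colocar_minas (filas : Int) (columnas : Int) (minas : Int) (out : List (List Int)) : Prop := out = colocar_minas_alt filas columnas minas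
instance (filas : Int) (columnas : Int) (minas : Int) (out : List (List Int)) : Decidable (Spec_colocar_minas filas columnas minas out) := by unfold Spec_colocar_minas; infer_instance

-- ===== CLAIM (what is proved, stated in full; the proofs are below) =====
def Claim_equal_colocar_minas : Prop := ∀ (filas : Int) (columnas : Int) (minas : Int), Dom_colocar_minas filas columnas minas → Spec_colocar_minas filas columnas minas (colocar_minas filas columnas minas)

-- ===== LEMMAS AND PROOFS =====

-- the counter value after processing t further cells starting from counter n
def pvNextC (n t m : Int) : Int := if n < m then (if n + t < m then n + t else m) else n

lemma inner_fold (m : Int) (L : List Int) (acc : List Int) (n : Int) :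
    L.foldl (pvStepCell m) (acc, n)
      = (acc ++ (List.range L.length).map (fun (k : ℕ) => if (n + (k : Int)) < m then (-1 : Int) else 0),
         pvNextC n L.length m) := by
  induction L generalizing acc n with
  | nil => simp [pvNextC]; omega
  | cons x L ih =>
    simp only [List.foldl_cons, pvStepCell]
    split_ifs with h
    · rw [ih]
      refine Prod.ext ?_ ?_
      · simp only [List.length_cons, List.range_succ_eq_map, List.map_cons, List.map_map]
        simp [h]
        intro a _
        refine if_congr (by omega) rfl rfl
      · simp only [List.length_cons]
        unfold pvNextC; split_ifs <;> omega
    · rw [ih]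
      refine Prod.ext ?_ ?_
      · simp only [List.length_cons, List.range_succ_eq_map, List.map_cons, List.map_map]
        simp [h]
        intro a _
        refine if_congr (by omega) rfl rfl
      · simp only [List.length_cons]
        unfold pvNextC; split_ifs <;> omega

lemma outer_fold (c m : Int) (L : List Int) (acc : List (List Int)) (n : Int) :
    L.foldl (pvStepRow c m) (acc, n)
      = (acc ++ (List.range L.length).map (fun (i : ℕ) =>
            (List.range c.toNat).map (fun (j : ℕ) =>
              if (n + (i : Int) * c.toNat + (j : Int)) < m then (-1 : Int) else 0)),
         pvNextC n (L.length * c.toNat) m) := by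
  induction L generalizing acc n with
  | nil => simp [pvNextC]; omega
  | cons x L ih =>
    simp only [List.foldl_cons, pvStepRow, inner_fold]
    rw [ih]
    have hlen : ((PySem.List.pyRange 0 c 1).length : Int) = (c.toNat : Int) := by
      rw [PySem.List.length_pyRange_one]; omega
    have hlenN : (PySem.List.pyRange 0 c 1).length = c.toNat := by
      exact_mod_cast hlen
    refine Prod.ext ?_ ?_
    · simp only [List.length_cons, List.range_succ_eq_map, List.map_cons, List.map_map]
      simp only [List.append_assoc, List.cons_append, List.nil_append]
      congr 1
      congr 1
      · rw [hlenN]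
        refine List.map_congr_left (fun k _ => ?_)
        refine if_congr ?_ rfl rfl
        push_cast; omega
      · congr 1
        funext i
        simp only [Function.comp_apply]
        refine List.map_congr_left (fun j _ => ?_)
        refine if_congr ?_ rfl rfl
        rw [hlen]
        have hsucc : ((i.succ : ℕ) : Int) * ((c.toNat : ℕ) : Int)
            = (i : Int) * ((c.toNat : ℕ) : Int) + ((c.toNat : ℕ) : Int) := by push_cast; ring
        rw [hsucc]
        have e1 : (0 : Int) ≤ (i : Int) * ((c.toNat : ℕ) : Int) := by positivity
        generalize (i : Int) * ((c.toNat : ℕ) : Int) = p at e1 ⊢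
        unfold pvNextC; split_ifs <;> omega
    · simp only [List.length_cons, hlen]
      have hsucc : ((L.length + 1 : ℕ) : Int) * ((c.toNat : ℕ) : Int)
          = (L.length : Int) * ((c.toNat : ℕ) : Int) + ((c.toNat : ℕ) : Int) := by push_cast; ring
      rw [hsucc]
      have e1 : (0 : Int) ≤ (L.length : Int) * ((c.toNat : ℕ) : Int) := by positivity
      generalize (L.length : Int) * ((c.toNat : ℕ) : Int) = p at e1 ⊢
      unfold pvNextC; split_ifs <;> omega

-- the common canonical form of both programs
def pvCanon (filas columnas minas : Int) : List (List Int) :=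
  (List.range filas.toNat).map (fun (i : ℕ) =>
    (List.range columnas.toNat).map (fun (j : ℕ) =>
      if ((i * columnas.toNat + j : Nat) : Int) < minas then (-1 : Int) else 0))

lemma colocar_eq_canon (f c m : Int) : colocar_minas f c m = pvCanon f c m := by
  unfold colocar_minas pvCanon
  rw [outer_fold]
  have hlenN : (PySem.List.pyRange 0 f 1).length = f.toNat := by
    rw [PySem.List.length_pyRange_one]; omega
  simp only [hlenN, List.nil_append]
  refine List.map_congr_left (fun i _ => ?_)
  refine List.map_congr_left (fun j _ => ?_)
  refine if_congr ?_ rfl rfl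
  push_cast; omega

lemma slice_of_nil {α : Type} (a b : Int) : PySem.List.slice ([] : List α) (some a) (some b) = [] := by
  have h := PySem.List.length_slice ([] : List α) a b
  have h0a : PySem.List.clampIdx ([] : List α).length a = 0 := by
    have := PySem.List.clampIdx_le ([] : List α).length a
    simp at *; omega
  have h0b : PySem.List.clampIdx ([] : List α).length b = 0 := by
    have := PySem.List.clampIdx_le ([] : List α).length b
    simp at *; omega
  rw [h0a, h0b] at h
  exact List.eq_nil_of_length_eq_zero (by omega)

lemma alt_eq_canon (f c m : Int) : colocar_minas_alt f c m = pvCanon f c m := by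
  unfold colocar_minas_alt pvCanon
  simp only []
  have hflat : (PySem.List.pyRange 0 (max f 0 * max c 0) 1).map (fun k => if k < m then (-1 : Int) else 0)
      = (List.range (f.toNat * c.toNat)).map (fun k => if ((k : Nat) : Int) < m then (-1 : Int) else 0) := by
    rw [PySem.List.pyRange_one]
    have : (max f 0 * max c 0 - 0).toNat = f.toNat * c.toNat := by
      have hf : max f 0 = ((f.toNat : Int)) := by omega
      have hc : max c 0 = ((c.toNat : Int)) := by omega
      rw [hf, hc]; push_cast; omega
    rw [this, List.map_map]
    refine List.map_congr_left (fun k _ => ?_)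
    simp only [Function.comp_apply]
    refine if_congr ?_ rfl rfl
    push_cast; omega
  rw [hflat, PySem.List.pyRange_one]
  have hf0 : (f - 0).toNat = f.toNat := by omega
  rw [hf0, List.map_map]
  refine List.map_congr_left (fun i hi => ?_)
  simp only [Function.comp_apply]
  have hi' : i < f.toNat := List.mem_range.mp hi
  by_cases hc : 0 < c
  · -- c > 0 : the slice picks cells i*c .. (i+1)*c-1 of the flat list
    have hcN : ((c.toNat : Int)) = c := by omega
    have hab : ((0 : Int) + (i : Int)) * c = ((i * c.toNat : Nat) : Int) := by
      push_cast; rw [hcN]; ring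
    have hb : ((0 : Int) + (i : Int) + 1) * c = ((i * c.toNat : Nat) : Int) + ((c.toNat : Nat) : Int) := by
      push_cast; rw [hcN]; ring
    rw [hab, hb, PySem.List.slice_natCast_add]
    have hsplit : f.toNat * c.toNat = i * c.toNat + (f.toNat * c.toNat - i * c.toNat) := by
      have : i * c.toNat ≤ f.toNat * c.toNat := Nat.mul_le_mul_right _ (by omega)
      omega
    rw [hsplit, List.range_add, List.map_append, List.drop_append_of_le_length (by simp)]
    rw [List.drop_eq_nil_of_le (by simp), List.nil_append, List.map_map, ← List.map_take, List.take_range]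
    have hmin : min c.toNat (f.toNat * c.toNat - i * c.toNat) = c.toNat := by
      have h1 : (i + 1) * c.toNat ≤ f.toNat * c.toNat := Nat.mul_le_mul_right _ (by omega)
      have : c.toNat ≤ f.toNat * c.toNat - i * c.toNat := by
        rw [Nat.add_mul, Nat.one_mul] at h1; omega
      omega
    rw [hmin]
    refine List.map_congr_left (fun j _ => ?_)
    simp only [Function.comp_apply]
  · -- c ≤ 0 : the row is empty on both sides
    have hc0 : c.toNat = 0 := by omega
    have : f.toNat * c.toNat = 0 := by rw [hc0]; ring
    rw [this, hc0]
    simp [slice_of_nil]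

-- ===== VERDICT (by name: the statement is the Claim_ definition above) =====
theorem colocar_minas_spec : Claim_equal_colocar_minas := by
  intro f c m _
  unfold Spec_colocar_minas
  rw [colocar_eq_canon, alt_eq_canon]
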